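-- pv_equiv track=rewrite | github.com/heliosssssssssss/aipo | earthquake.py | findEarthquake
-- ===== SOURCE A (Python) =====
-- def findEarthquake(sequence):
--     n = len(sequence)
--     max_duration = 0
--     count_ones = 0  # Track the length of the current cluster of 1's
--     leading_zeros = 0  # Track the number of leading zeros before the cluster
--
--     i = 0
--     while i < n:
--         if sequence[i] == "0":
--             if count_ones == 0:
--                 leading_zeros += 1  # Count leading zeros
--             else:
--                 # End of a cluster of 1's, check for trailing zeros
--                 trailing_zeros = 0
--                 while i < n and sequence[i] == "0":
--                     trailing_zeros += 1
--                     i += 1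
--
--                 # Valid earthquake: at least 2 leading and trailing zeros
--                 if leading_zeros >= 2 and trailing_zeros >= 2:
--                     max_duration = max(max_duration, count_ones)
--
--                 # Reset for the next cluster
--                 count_ones = 0
--                 leading_zeros = trailing_zeros
--                 continue
--         else:
--             # Count the length of the current cluster of 1's
--             count_ones += 1
--
--         i += 1
--
--     return max_duration
-- ===== SOURCE B (Python) =====
-- def findEarthquake(sequence):
--     # Run-length encode the sequence (True = a run of "0"s), then scan
--     # each run with its two neighbours: a cluster of ones counts iff the
--     # zero-run on each side has length >= 2.
--     runs = []
--     for c in sequence: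
--         z = (c == "0")
--         if runs and runs[-1][0] == z:
--             runs[-1][1] += 1
--         else:
--             runs.append([z, 1])
--     best = 0
--     for left, mid, right in zip(runs, runs[1:], runs[2:]):
--         if not mid[0] and left[1] >= 2 and right[1] >= 2:
--             best = max(best, mid[1])
--     return best
-- ===== Notes on version B (the rewrite author's own statement) =====
-- stated objective: alternative
-- what changed: A's single stateful scan (leading/trailing zero counters with a nested zero-consuming while loop) is replaced by a run-length encoding of the sequence followed by a three-run sliding-window scan that keeps a cluster iff both neighbouring zero-runs have length >= 2.
import Mathlib
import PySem

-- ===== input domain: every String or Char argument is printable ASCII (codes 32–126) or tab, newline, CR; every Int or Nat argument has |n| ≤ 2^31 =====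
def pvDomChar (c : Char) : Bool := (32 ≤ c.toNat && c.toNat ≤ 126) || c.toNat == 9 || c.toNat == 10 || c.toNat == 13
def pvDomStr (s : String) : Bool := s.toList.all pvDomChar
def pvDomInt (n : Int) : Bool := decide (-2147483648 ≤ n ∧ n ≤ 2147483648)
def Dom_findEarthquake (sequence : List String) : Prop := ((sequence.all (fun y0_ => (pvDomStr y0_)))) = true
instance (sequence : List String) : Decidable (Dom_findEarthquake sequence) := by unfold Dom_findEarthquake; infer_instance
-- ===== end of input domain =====

-- B replaces A's stateful single pass (nested zero-counting while loop) with a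
-- run-length encoding plus a neighbour-window scan; same O(n) cost (objective: alternative).

-- ===== PORT A =====
-- inner `while i < n and sequence[i] == "0"` of A: returns (number of leading "0"s, rest)
def pvCountZeros : List String → Nat × List String
  | [] => (0, [])
  | c :: t => if c == "0" then ((pvCountZeros t).1 + 1, (pvCountZeros t).2) else (0, c :: t)

theorem pvCountZeros_len : ∀ l : List String, (pvCountZeros l).2.length ≤ l.length := by
  intro l; induction l with
  | nil => simp [pvCountZeros]
  | cons c t ih =>
    simp only [pvCountZeros]
    split
    · simpa using Nat.le_succ_of_le ih
    · simp

-- A's outer while loop; the index i is replaced by the remaining suffix of the list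
def pvLoopA : List String → Nat → Nat → Int → Int
  | [], _, _, maxd => maxd
  | c :: t, count, lead, maxd =>
    if c == "0" then
      if count = 0 then pvLoopA t count (lead + 1) maxd
      else
        let p := pvCountZeros (c :: t)
        pvLoopA p.2 0 p.1 (if 2 ≤ lead ∧ 2 ≤ p.1 then max maxd (count : Int) else maxd)
    else pvLoopA t (count + 1) lead maxd
termination_by l => l.length
decreasing_by
  · simp
  · have h := pvCountZeros_len t
    simp only [pvCountZeros]
    split
    · simpa using Nat.lt_succ_of_le h
    · simp_all
  · simp

def findEarthquake (sequence : List String) : Int := pvLoopA sequence 0 0 0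

-- ===== PORT B =====
-- Source B's first loop: run-length encode (runs kept in reverse while building,
-- `runs[-1][1] += 1` = bump the head, `runs.append` = cons; reversed at the end)
def pvStep (acc : List (Bool × Nat)) (c : String) : List (Bool × Nat) :=
  match acc with
  | (z', n) :: rest => if z' = (c == "0") then ((c == "0"), n + 1) :: rest
                       else ((c == "0"), 1) :: (z', n) :: rest
  | [] => [((c == "0"), 1)]

-- Source B's second loop: fold over zip(runs, runs[1:], runs[2:])
def pvWindow (best : Int) (t : (Bool × Nat) × (Bool × Nat) × (Bool × Nat)) : Int :=
  if t.2.1.1 = false ∧ 2 ≤ t.1.2 ∧ 2 ≤ t.2.2.2 then max best (t.2.1.2 : Int) else best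

def findEarthquake_alt (sequence : List String) : Int :=
  let runs := (sequence.foldl pvStep []).reverse
  (runs.zip ((runs.drop 1).zip (runs.drop 2))).foldl pvWindow 0

-- ===== PRECONDITION & SPEC =====
def Spec_findEarthquake (sequence : List String) (out : Int) : Prop := out = findEarthquake_alt sequence
instance (sequence : List String) (out : Int) : Decidable (Spec_findEarthquake sequence out) := by unfold Spec_findEarthquake; infer_instance

-- ===== CLAIM (what is proved, stated in full; the proofs are below) =====
def Claim_equal_findEarthquake : Prop := ∀ (sequence : List String), Dom_findEarthquake sequence → Spec_findEarthquake sequence (findEarthquake sequence)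

-- ===== LEMMAS AND PROOFS =====

-- clean (cons-based) run-length encoding, used only by the proofs
def pvMerge (p : Bool × Nat) (r : List (Bool × Nat)) : List (Bool × Nat) :=
  match r with
  | (z', m) :: rest => if p.1 = z' then (p.1, p.2 + m) :: rest else p :: r
  | [] => [p]

def pvRuns : List String → List (Bool × Nat)
  | [] => []
  | c :: t => pvMerge ((c == "0"), 1) (pvRuns t)

-- the reference score over runs: lead = current zero-run length, count = current one-run length
def pvSc : Nat → Nat → List (Bool × Nat) → Int
  | _, _, [] => 0
  | lead, count, (false, m) :: rest => pvSc lead (count + m) rest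
  | lead, count, (true, z) :: rest =>
      if count = 0 then pvSc (lead + z) 0 rest
      else max (if 2 ≤ lead ∧ 2 ≤ z then (count : Int) else 0) (pvSc z 0 rest)

theorem pvSc_nonneg : ∀ r lead count, 0 ≤ pvSc lead count r := by
  intro r; induction r with
  | nil => intro _ _; simp [pvSc]
  | cons p rest ih =>
    intro lead count
    obtain ⟨z, m⟩ := p
    cases z <;> simp only [pvSc]
    · exact ih _ _
    · split
      · exact ih _ _
      · exact le_max_of_le_right (ih _ _)

theorem pvMerge_head_fst (p : Bool × Nat) (r : List (Bool × Nat)) :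
    ∃ m rest, pvMerge p r = (p.1, m) :: rest := by
  match r with
  | [] => exact ⟨p.2, [], by simp [pvMerge]⟩
  | (z', m') :: rest =>
    by_cases h : p.1 = z'
    · exact ⟨p.2 + m', rest, by simp [pvMerge, h]⟩
    · exact ⟨p.2, (z', m') :: rest, by simp [pvMerge, h]⟩

theorem pvRuns_zeros : ∀ (t : List String),
    pvRuns (("0" : String) :: t)
      = (true, (pvCountZeros (("0" : String) :: t)).1)
          :: pvRuns (pvCountZeros (("0" : String) :: t)).2 := by
  intro t; induction t with
  | nil => rfl
  | cons c t ih =>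
    by_cases hc : c = ("0" : String)
    · subst hc
      have h1 : pvCountZeros (("0" : String) :: ("0" : String) :: t)
          = ((pvCountZeros (("0" : String) :: t)).1 + 1, (pvCountZeros (("0" : String) :: t)).2) := by
        conv_lhs => rw [pvCountZeros]
        simp
      have h0 : pvRuns (("0" : String) :: ("0" : String) :: t)
          = pvMerge (true, 1) (pvRuns (("0" : String) :: t)) := by simp [pvRuns]
      rw [h0, ih, h1]
      simp [pvMerge, Nat.add_comm]
    · have hb : (c == ("0" : String)) = false := by simpa using hc
      have h1 : pvCountZeros (("0" : String) :: c :: t) = (1, c :: t) := by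
        conv_lhs => rw [pvCountZeros]
        simp [pvCountZeros, hb]
      obtain ⟨m, rest, hm⟩ := pvMerge_head_fst ((c == ("0" : String)), 1) (pvRuns t)
      have h2 : pvRuns (c :: t) = (false, m) :: rest := by
        have : pvRuns (c :: t) = pvMerge ((c == ("0" : String)), 1) (pvRuns t) := by simp [pvRuns]
        rw [this, hm, hb]
      have h0 : pvRuns (("0" : String) :: c :: t)
          = pvMerge (true, 1) (pvRuns (c :: t)) := by simp [pvRuns]
      rw [h0, h2, h1]
      simp [pvMerge, h2]

theorem pvSc_merge_zero (r : List (Bool × Nat)) (lead : Nat) :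
    pvSc lead 0 (pvMerge (true, 1) r) = pvSc (lead + 1) 0 r := by
  match r with
  | [] => simp [pvMerge, pvSc]
  | (true, m) :: rest =>
    simp [pvMerge, pvSc, Nat.add_comm, Nat.add_left_comm]
  | (false, L) :: rest =>
    simp [pvMerge, pvSc]

theorem pvSc_merge_one (r : List (Bool × Nat)) (lead count : Nat) :
    pvSc lead count (pvMerge (false, 1) r) = pvSc lead (count + 1) r := by
  match r with
  | [] => simp [pvMerge, pvSc]
  | (true, m) :: rest => simp [pvMerge, pvSc]
  | (false, L) :: rest =>
    simp [pvMerge, pvSc, Nat.add_comm, Nat.add_left_comm]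

-- the main loop invariant of A: pvLoopA is `max` of the accumulator and the run score
theorem pvLoopA_sc : ∀ (n : Nat) (l : List String), l.length ≤ n →
    ∀ (count lead : Nat) (maxd : Int), 0 ≤ maxd →
    pvLoopA l count lead maxd = max maxd (pvSc lead count (pvRuns l)) := by
  intro n
  induction n with
  | zero =>
    intro l hl count lead maxd hm
    have : l = [] := List.length_eq_zero_iff.mp (Nat.le_zero.mp hl)
    subst this
    rw [show pvLoopA [] count lead maxd = maxd from by simp [pvLoopA]]
    simp only [pvRuns, pvSc]
    exact (max_eq_left hm).symm
  | succ n ih =>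
    intro l hl count lead maxd hm
    match l with
    | [] =>
      rw [show pvLoopA [] count lead maxd = maxd from by simp [pvLoopA]]
      simp only [pvRuns, pvSc]
      exact (max_eq_left hm).symm
    | c :: t =>
      have ht : t.length ≤ n := by simpa using hl
      by_cases hc : c = ("0" : String)
      · subst hc
        by_cases hcount : count = 0
        · subst hcount
          rw [show pvLoopA (("0" : String) :: t) 0 lead maxd = pvLoopA t 0 (lead + 1) maxd from by
            simp [pvLoopA]]
          rw [ih t ht 0 (lead + 1) maxd hm]
          rw [show pvRuns (("0" : String) :: t) = pvMerge (true, 1) (pvRuns t) from by simp [pvRuns]]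
          rw [pvSc_merge_zero]
        · have hz := pvRuns_zeros t
          set p := pvCountZeros (("0" : String) :: t) with hp
          have hlen : p.2.length ≤ n := by
            have : p.2.length ≤ t.length := by
              rw [hp]
              conv_lhs => rw [pvCountZeros]
              simp
              exact pvCountZeros_len t
            omega
          have hstep : pvLoopA (("0" : String) :: t) count lead maxd
              = pvLoopA p.2 0 p.1 (if 2 ≤ lead ∧ 2 ≤ p.1 then max maxd (count : Int) else maxd) := by
            conv_lhs => rw [pvLoopA]
            simp [hcount, hp]
          rw [hstep]
          have hm' : 0 ≤ (if 2 ≤ lead ∧ 2 ≤ p.1 then max maxd (count : Int) else maxd) := by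
            split
            · exact le_max_of_le_left hm
            · exact hm
          rw [ih p.2 hlen 0 p.1 _ hm', hz]
          have hX : 0 ≤ pvSc p.1 0 (pvRuns p.2) := pvSc_nonneg _ _ _
          rw [show pvSc lead count ((true, p.1) :: pvRuns p.2)
              = max (if 2 ≤ lead ∧ 2 ≤ p.1 then (count : Int) else 0) (pvSc p.1 0 (pvRuns p.2)) from by
            simp [pvSc, hcount]]
          by_cases hcond : 2 ≤ lead ∧ 2 ≤ p.1
          · simp [hcond, max_assoc]
          · simp [hcond, max_eq_right hX]
      · have hb : (c == ("0" : String)) = false := by simpa using hc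
        rw [show pvLoopA (c :: t) count lead maxd = pvLoopA t (count + 1) lead maxd from by
          simp [pvLoopA, hb]]
        rw [ih t ht (count + 1) lead maxd hm]
        rw [show pvRuns (c :: t) = pvMerge ((c == ("0" : String)), 1) (pvRuns t) from by simp [pvRuns]]
        rw [hb, pvSc_merge_one]

-- B-side: the zip-window fold, as a function of the runs list
def pvZf (r : List (Bool × Nat)) (b : Int) : Int :=
  (r.zip ((r.drop 1).zip (r.drop 2))).foldl pvWindow b

theorem pvZf_cons3 (x y z : Bool × Nat) (r : List (Bool × Nat)) (b : Int) :
    pvZf (x :: y :: z :: r) b = pvZf (y :: z :: r) (pvWindow b (x, (y, z))) := by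
  simp [pvZf]

theorem pvWindow_nonneg (b : Int) (t : (Bool × Nat) × (Bool × Nat) × (Bool × Nat))
    (hb : 0 ≤ b) : 0 ≤ pvWindow b t := by
  unfold pvWindow; split
  · exact le_max_of_le_left hb
  · exact hb

theorem pvWindow_shift (b : Int) (t : (Bool × Nat) × (Bool × Nat) × (Bool × Nat))
    (hb : 0 ≤ b) : pvWindow b t = max b (pvWindow 0 t) := by
  by_cases h : t.2.1.1 = false ∧ 2 ≤ t.1.2 ∧ 2 ≤ t.2.2.2
  · simp only [pvWindow, if_pos h]
    rw [max_eq_right (Int.natCast_nonneg _)]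
  · simp only [pvWindow, if_neg h]
    rw [max_eq_left hb]

theorem pvFoldW_shift : ∀ (ts : List ((Bool × Nat) × (Bool × Nat) × (Bool × Nat))) (b : Int),
    0 ≤ b → ts.foldl pvWindow b = max b (ts.foldl pvWindow 0) := by
  intro ts; induction ts with
  | nil => intro b hb; exact (max_eq_left hb).symm
  | cons t ts ih =>
    intro b hb
    have h0 : (0 : Int) ≤ pvWindow 0 t := pvWindow_nonneg 0 t le_rfl
    calc (t :: ts).foldl pvWindow b = ts.foldl pvWindow (pvWindow b t) := rfl
      _ = max (pvWindow b t) (ts.foldl pvWindow 0) := ih _ (pvWindow_nonneg b t hb)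
      _ = max (max b (pvWindow 0 t)) (ts.foldl pvWindow 0) := by rw [pvWindow_shift b t hb]
      _ = max b (max (pvWindow 0 t) (ts.foldl pvWindow 0)) := max_assoc _ _ _
      _ = max b (ts.foldl pvWindow (pvWindow 0 t)) := by rw [← ih _ h0]
      _ = max b ((t :: ts).foldl pvWindow 0) := rfl

theorem pvZf_shift (r : List (Bool × Nat)) (b : Int) (hb : 0 ≤ b) :
    pvZf r b = max b (pvZf r 0) := pvFoldW_shift _ b hb

theorem pvZf_skip (x : Bool × Nat) (m : Nat) (r2 : List (Bool × Nat)) :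
    pvZf (x :: (true, m) :: r2) 0 = pvZf ((true, m) :: r2) 0 := by
  match r2 with
  | [] => rfl
  | w :: r3 =>
    rw [pvZf_cons3]
    simp [pvWindow]

-- C1: the zip-window fold with a zero-run head equals the score with that lead
theorem pvZf_sc_aux : ∀ (k : Nat) (r : List (Bool × Nat)), r.length ≤ k → ∀ (a : Nat),
    List.IsChain (fun p q => p.1 ≠ q.1) ((true, a) :: r) → (∀ p ∈ r, 1 ≤ p.2) →
    pvZf ((true, a) :: r) 0 = pvSc a 0 r := by
  intro k
  induction k with
  | zero =>
    intro r hr a _ _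
    have : r = [] := List.length_eq_zero_iff.mp (Nat.le_zero.mp hr)
    subst this; rfl
  | succ k ih =>
    intro r hr a hchain hpos
    match r with
    | [] => rfl
    | (z, L) :: rest =>
      have hz : z = false := by
        have := (List.isChain_cons_cons.mp hchain).1
        simp at this
        exact this
      subst hz
      match rest with
      | [] =>
        show pvZf [(true, a), (false, L)] 0 = pvSc a 0 [(false, L)]
        rfl
      | (z2, m) :: r2 =>
        have hz2 : z2 = true := by
          have := (List.isChain_cons_cons.mp (List.isChain_cons_cons.mp hchain).2).1
          simp at this
          exact this
        subst hz2
        have hL : 1 ≤ L := hpos (false, L) (by simp)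
        have hb1 : pvWindow 0 ((true, a), ((false, L), (true, m)))
            = (if 2 ≤ a ∧ 2 ≤ m then (L : Int) else 0) := by
          by_cases hc : 2 ≤ a ∧ 2 ≤ m
          · simp [pvWindow, hc.1, hc.2]
          · simp only [pvWindow, if_neg hc]
            rw [if_neg (by simpa using hc)]
        have hchain2 : List.IsChain (fun p q => p.1 ≠ q.1) ((true, m) :: r2) :=
          (List.isChain_cons_cons.mp (List.isChain_cons_cons.mp hchain).2).2
        have hpos2 : ∀ p ∈ r2, 1 ≤ p.2 := fun p hp => hpos p (by simp [hp])
        have hlen : r2.length ≤ k := by simp at hr; omega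
        calc pvZf ((true, a) :: (false, L) :: (true, m) :: r2) 0
            = pvZf ((false, L) :: (true, m) :: r2)
                (pvWindow 0 ((true, a), ((false, L), (true, m)))) := pvZf_cons3 _ _ _ _ _
          _ = max (if 2 ≤ a ∧ 2 ≤ m then (L : Int) else 0)
                (pvZf ((false, L) :: (true, m) :: r2) 0) := by
              rw [hb1, pvZf_shift _ _ (by positivity)]
          _ = max (if 2 ≤ a ∧ 2 ≤ m then (L : Int) else 0) (pvZf ((true, m) :: r2) 0) := by
              rw [pvZf_skip]
          _ = max (if 2 ≤ a ∧ 2 ≤ m then (L : Int) else 0) (pvSc m 0 r2) := by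
              rw [ih r2 hlen m hchain2 hpos2]
          _ = pvSc a 0 ((false, L) :: (true, m) :: r2) := by
              have hLne : L ≠ 0 := by omega
              simp [pvSc, hLne]

theorem pvMerge_chain (p : Bool × Nat) (r : List (Bool × Nat))
    (h : List.IsChain (fun a b => a.1 ≠ b.1) r) :
    List.IsChain (fun a b => a.1 ≠ b.1) (pvMerge p r) := by
  match r with
  | [] => simp [pvMerge]
  | (z', m) :: rest =>
    by_cases hz : p.1 = z'
    · simp only [pvMerge, if_pos hz]
      match rest with
      | [] => simp
      | q :: rest2 =>
        rw [List.isChain_cons_cons] at h ⊢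
        exact ⟨by simpa [hz] using h.1, h.2⟩
    · simp only [pvMerge, if_neg hz]
      rw [List.isChain_cons_cons]
      exact ⟨hz, h⟩

theorem pvRuns_chain : ∀ l : List String, List.IsChain (fun a b => a.1 ≠ b.1) (pvRuns l) := by
  intro l; induction l with
  | nil => simp [pvRuns]
  | cons c t ih => exact pvMerge_chain _ _ ih

theorem pvMerge_pos (p : Bool × Nat) (r : List (Bool × Nat)) (hp : 1 ≤ p.2)
    (h : ∀ q ∈ r, 1 ≤ q.2) : ∀ q ∈ pvMerge p r, 1 ≤ q.2 := by
  match r with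
  | [] => simpa [pvMerge] using hp
  | (z', m) :: rest =>
    by_cases hz : p.1 = z'
    · simp only [pvMerge, if_pos hz]
      intro q hq
      rcases List.mem_cons.mp hq with hq | hq
      · subst hq; simp; omega
      · exact h q (by simp [hq])
    · simp only [pvMerge, if_neg hz]
      intro q hq
      rcases List.mem_cons.mp hq with hq | hq
      · subst hq; exact hp
      · exact h q hq

theorem pvRuns_pos : ∀ (l : List String), ∀ q ∈ pvRuns l, 1 ≤ q.2 := by
  intro l; induction l with
  | nil => simp [pvRuns]
  | cons c t ih => exact pvMerge_pos _ _ (by simp) ih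

-- the B-side fold over any run-length encoding that alternates with positive lengths
theorem pvZf_sc (r : List (Bool × Nat)) (hchain : List.IsChain (fun a b => a.1 ≠ b.1) r)
    (hpos : ∀ q ∈ r, 1 ≤ q.2) : pvZf r 0 = pvSc 0 0 r := by
  match r with
  | [] => rfl
  | (true, a) :: rest =>
    rw [pvZf_sc_aux rest.length rest le_rfl a hchain (fun q hq => hpos q (by simp [hq]))]
    simp [pvSc]
  | (false, L) :: rest =>
    match rest with
    | [] =>
      show (0 : Int) = pvSc 0 0 [(false, L)]
      simp [pvSc]
    | (z2, m) :: r2 =>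
      have hz2 : z2 = true := by
        have := (List.isChain_cons_cons.mp hchain).1
        simpa using this
      subst hz2
      have hL : 1 ≤ L := hpos (false, L) (by simp)
      have hLne : L ≠ 0 := by omega
      rw [pvZf_skip, pvZf_sc_aux r2.length r2 le_rfl m (List.isChain_cons_cons.mp hchain).2
        (fun q hq => hpos q (by simp [hq]))]
      have hX : 0 ≤ pvSc m 0 r2 := pvSc_nonneg _ _ _
      simp [pvSc, hLne, max_eq_right hX]

-- the incremental (append-at-end) run builder of Source B equals the cons-based pvRuns
theorem pvMerge_merge (z : Bool) (n : Nat) (r : List (Bool × Nat)) :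
    pvMerge (z, n) (pvMerge (z, 1) r) = pvMerge (z, n + 1) r := by
  match r with
  | [] => simp [pvMerge]
  | (z', m) :: rest =>
    by_cases hz : z = z'
    · subst hz
      simp only [pvMerge]
      simp [Nat.add_comm, Nat.add_left_comm]
    · simp [pvMerge, hz]

theorem pvFoldStep : ∀ (l : List String) (z : Bool) (n : Nat) (acc : List (Bool × Nat)),
    l.foldl pvStep ((z, n) :: acc) = (pvMerge (z, n) (pvRuns l)).reverse ++ acc := by
  intro l; induction l with
  | nil => intro z n acc; simp [pvRuns, pvMerge]
  | cons c t ih =>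
    intro z n acc
    by_cases hz : z = (c == ("0" : String))
    · rw [show List.foldl pvStep ((z, n) :: acc) (c :: t)
          = List.foldl pvStep (((c == ("0" : String)), n + 1) :: acc) t from by
        simp [List.foldl, pvStep, if_pos hz]]
      rw [ih, hz]
      rw [show pvRuns (c :: t) = pvMerge ((c == ("0" : String)), 1) (pvRuns t) from rfl]
      rw [pvMerge_merge]
    · rw [show List.foldl pvStep ((z, n) :: acc) (c :: t)
          = List.foldl pvStep (((c == ("0" : String)), 1) :: (z, n) :: acc) t from by
        simp [List.foldl, pvStep, if_neg hz]]
      rw [ih]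
      obtain ⟨m, rest, hm⟩ := pvMerge_head_fst ((c == ("0" : String)), 1) (pvRuns t)
      rw [show pvRuns (c :: t) = pvMerge ((c == ("0" : String)), 1) (pvRuns t) from rfl]
      rw [hm]
      rw [show pvMerge (z, n) (((c == ("0" : String)), m) :: rest)
          = (z, n) :: ((c == ("0" : String)), m) :: rest from by
        simp [pvMerge, hz]]
      simp

theorem pvFoldNil (l : List String) : l.foldl pvStep [] = (pvRuns l).reverse := by
  match l with
  | [] => rfl
  | c :: t =>
    rw [show List.foldl pvStep [] (c :: t)
        = List.foldl pvStep [((c == ("0" : String)), 1)] t from by simp [List.foldl, pvStep]]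
    rw [pvFoldStep t ((c == ("0" : String))) 1 []]
    simp [pvRuns]

-- ===== VERDICT (by name: the statement is the Claim_ definition above) =====
theorem findEarthquake_spec : Claim_equal_findEarthquake := by
  unfold Claim_equal_findEarthquake
  intro l _
  unfold Spec_findEarthquake findEarthquake findEarthquake_alt
  rw [pvLoopA_sc l.length l le_rfl 0 0 0 le_rfl]
  show max 0 (pvSc 0 0 (pvRuns l)) = pvZf ((l.foldl pvStep []).reverse) 0
  rw [show (l.foldl pvStep []).reverse = pvRuns l from by rw [pvFoldNil]; simp]
  rw [pvZf_sc (pvRuns l) (pvRuns_chain l) (pvRuns_pos l)]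
  exact max_eq_right (pvSc_nonneg _ _ _)
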